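-- pv_equiv track=rewrite | github.com/Pitt-JonesLab/clonk_transpilation | src/clonk/backend_utils/mock_backends/Corral_backend_v1.py | snail_to_connectivity
-- ===== SOURCE A (Python) =====
-- def snail_to_connectivity(snail_edge_list):
--     # Convert snail edge list where nodes are snails and edges are qubits
--     # To connectivity edge list where nodes are qubits and edges are coupling
--     edge_list = []
--
--     # qubits are coupled to a snail edge if they are both adjacent to a snail node
--     for qubit, snail_edge in enumerate(snail_edge_list):
--         for temp_qubit, temp_snail_edge in enumerate(snail_edge_list):
--             if qubit != temp_qubit and (
--                 snail_edge[0] in temp_snail_edge or snail_edge[1] in temp_snail_edge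
--             ):
--                 edge_list.append((qubit, temp_qubit))
--     return edge_list
-- ===== SOURCE B (Python) =====
-- def snail_to_connectivity(snail_edge_list):
--     # Index each snail node -> list of adjacent qubits (built in one pass),
--     # then per qubit union the two node lists, dedup, drop self, sort.
--     adj = {}
--     for qubit, (a, b) in enumerate(snail_edge_list):
--         for node in (a, b):
--             adj.setdefault(node, []).append(qubit)
--     edge_list = []
--     for qubit, (a, b) in enumerate(snail_edge_list):
--         neighbors = set(adj[a]) | set(adj[b])
--         neighbors.discard(qubit)
--         for other in sorted(neighbors):
--             edge_list.append((qubit, other))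
--     return edge_list
-- ===== Notes on version B (the rewrite author's own statement) =====
-- stated objective: faster
-- what changed: Replaced A's quadratic all-pairs scan over qubit edges by a one-pass snail-node -> adjacent-qubit index (dict of lists), then per qubit the union of its two nodes' qubit lists is deduped, self-excluded and sorted, producing A's exact row-major output.
import Mathlib
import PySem

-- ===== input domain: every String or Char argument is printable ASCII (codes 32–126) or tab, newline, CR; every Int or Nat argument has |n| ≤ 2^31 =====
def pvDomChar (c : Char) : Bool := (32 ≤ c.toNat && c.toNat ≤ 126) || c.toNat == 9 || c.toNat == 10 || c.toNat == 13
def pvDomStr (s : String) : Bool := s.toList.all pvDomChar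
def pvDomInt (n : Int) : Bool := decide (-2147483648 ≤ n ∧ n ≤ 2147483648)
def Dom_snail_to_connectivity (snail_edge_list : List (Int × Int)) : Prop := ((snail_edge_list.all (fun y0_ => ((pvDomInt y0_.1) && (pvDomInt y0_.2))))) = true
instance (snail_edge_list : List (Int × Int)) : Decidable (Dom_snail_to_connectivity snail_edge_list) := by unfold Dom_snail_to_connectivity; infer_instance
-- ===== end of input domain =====

-- B replaces A's quadratic all-pairs scan by a snail-node -> adjacent-qubits index built in
-- one pass, then per qubit unions, dedups and sorts the two neighbor lists (objective: faster).


-- ===== PORT A =====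
def snail_to_connectivity (snail_edge_list : List (Int × Int)) : List (Int × Int) :=
  (PySem.List.enumerate snail_edge_list).foldl
    (fun edge_list q =>
      (PySem.List.enumerate snail_edge_list).foldl
        (fun el t =>
          if q.1 ≠ t.1 ∧ ((q.2.1 = t.2.1 ∨ q.2.1 = t.2.2) ∨ (q.2.2 = t.2.1 ∨ q.2.2 = t.2.2))
          then el ++ [(q.1, t.1)] else el)
        edge_list)
    []

-- ===== PORT B =====
-- adj: snail node -> list of adjacent qubits (setdefault(node, []).append(qubit) = modify with default [])
def snailAdj (snail_edge_list : List (Int × Int)) : PySem.Dict Int (List Int) :=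
  (PySem.List.enumerate snail_edge_list).foldl
    (fun adj q =>
      [q.2.1, q.2.2].foldl (fun adj node => adj.modify node [] (fun l => l ++ [q.1])) adj)
    PySem.Dict.empty

def snail_to_connectivity_alt (snail_edge_list : List (Int × Int)) : List (Int × Int) :=
  (PySem.List.enumerate snail_edge_list).foldl
    (fun edge_list q =>
      (PySem.List.sorted
          (((PySem.Set.ofList ((snailAdj snail_edge_list).getD q.2.1 [])).union
              (PySem.Set.ofList ((snailAdj snail_edge_list).getD q.2.2 []))).discard q.1)
          (fun j => j)).foldl
        (fun el other => el ++ [(q.1, other)]) edge_list)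
    []

-- ===== PRECONDITION & SPEC =====
def Spec_snail_to_connectivity (snail_edge_list : List (Int × Int)) (out : List (Int × Int)) : Prop := out = snail_to_connectivity_alt snail_edge_list
instance (snail_edge_list : List (Int × Int)) (out : List (Int × Int)) : Decidable (Spec_snail_to_connectivity snail_edge_list out) := by unfold Spec_snail_to_connectivity; infer_instance

-- ===== CLAIM (what is proved, stated in full; the proofs are below) =====
def Claim_equal_snail_to_connectivity : Prop := ∀ (snail_edge_list : List (Int × Int)), Dom_snail_to_connectivity snail_edge_list → Spec_snail_to_connectivity snail_edge_list (snail_to_connectivity snail_edge_list)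

-- ===== LEMMAS AND PROOFS =====

-- the pair-sharing condition of A's inner test, as a Bool
def pvCond (q t : Int × Int × Int) : Bool :=
  decide (q.1 ≠ t.1) &&
    (decide (q.2.1 = t.2.1) || decide (q.2.1 = t.2.2) ||
     decide (q.2.2 = t.2.1) || decide (q.2.2 = t.2.2))

lemma pvA_flat (l : List (Int × Int)) :
    snail_to_connectivity l =
      (PySem.List.enumerate l).flatMap
        (fun q => ((PySem.List.enumerate l).filter (pvCond q)).map (fun t => (q.1, t.1))) := by
  unfold snail_to_connectivity
  have h1 : ∀ (q : Int × Int × Int) (acc : List (Int × Int)),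
      (PySem.List.enumerate l).foldl
        (fun el t =>
          if q.1 ≠ t.1 ∧ ((q.2.1 = t.2.1 ∨ q.2.1 = t.2.2) ∨ (q.2.2 = t.2.1 ∨ q.2.2 = t.2.2))
          then el ++ [(q.1, t.1)] else el) acc =
      acc ++ ((PySem.List.enumerate l).filter (pvCond q)).map (fun t => (q.1, t.1)) := by
    intro q acc
    rw [← PySem.List.foldl_append_if (pvCond q) (fun t => (q.1, t.1)) _ acc]
    congr 1
    funext el t
    by_cases hc : q.1 ≠ t.1 ∧ ((q.2.1 = t.2.1 ∨ q.2.1 = t.2.2) ∨ (q.2.2 = t.2.1 ∨ q.2.2 = t.2.2))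
    · rw [if_pos hc, if_pos]
      simp only [pvCond, Bool.and_eq_true, Bool.or_eq_true, decide_eq_true_eq]
      tauto
    · rw [if_neg hc, if_neg]
      simp only [pvCond, Bool.and_eq_true, Bool.or_eq_true, decide_eq_true_eq]
      tauto
  have h2 : (fun (acc : List (Int × Int)) (q : Int × Int × Int) =>
      (PySem.List.enumerate l).foldl
        (fun el t =>
          if q.1 ≠ t.1 ∧ ((q.2.1 = t.2.1 ∨ q.2.1 = t.2.2) ∨ (q.2.2 = t.2.1 ∨ q.2.2 = t.2.2))
          then el ++ [(q.1, t.1)] else el) acc) =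
      (fun acc q => acc ++ ((PySem.List.enumerate l).filter (pvCond q)).map (fun t => (q.1, t.1))) := by
    funext acc q; exact h1 q acc
  rw [h2, PySem.List.foldl_append_eq_flatMap]
  simp

lemma pvAdj_getD (l : List (Int × Int)) (v : Int) :
    (snailAdj l).getD v [] =
      (((PySem.List.enumerate l).flatMap (fun q => [(q.2.1, q.1), (q.2.2, q.1)])).filter
        (fun p => p.1 == v)).map (fun p => p.2) := by
  unfold snailAdj
  have : (fun (adj : PySem.Dict Int (List Int)) (q : Int × Int × Int) =>
      [q.2.1, q.2.2].foldl (fun adj node => adj.modify node [] (fun l => l ++ [q.1])) adj) =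
      (fun adj q => [(q.2.1, q.1), (q.2.2, q.1)].foldl
        (fun d p => d.modify p.1 [] (fun l => l ++ [p.2])) adj) := by
    funext adj q; rfl
  rw [this, ← List.foldl_flatMap, PySem.Dict.getD_foldl_modify_append]
  simp

lemma pvMem_adj (l : List (Int × Int)) (v j : Int) :
    j ∈ (snailAdj l).getD v [] ↔
      ∃ t ∈ PySem.List.enumerate l, (t.2.1 = v ∨ t.2.2 = v) ∧ t.1 = j := by
  rw [pvAdj_getD]
  simp only [List.mem_map, List.mem_filter, List.mem_flatMap, List.mem_cons,
    List.not_mem_nil, or_false, beq_iff_eq]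
  constructor
  · rintro ⟨p, ⟨⟨t, ht, hp | hp⟩, hv⟩, hj⟩ <;> subst hp <;>
      exact ⟨t, ht, by tauto, hj⟩
  · rintro ⟨t, ht, hor, hj⟩
    rcases hor with h | h
    · exact ⟨(t.2.1, t.1), ⟨⟨t, ht, Or.inl rfl⟩, h⟩, hj⟩
    · exact ⟨(t.2.2, t.1), ⟨⟨t, ht, Or.inr rfl⟩, h⟩, hj⟩

lemma pvB_flat (l : List (Int × Int)) :
    snail_to_connectivity_alt l =
      (PySem.List.enumerate l).flatMap
        (fun q =>
          (PySem.List.sorted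
              (((PySem.Set.ofList ((snailAdj l).getD q.2.1 [])).union
                  (PySem.Set.ofList ((snailAdj l).getD q.2.2 []))).discard q.1)
              (fun j => j)).map (fun j => (q.1, j))) := by
  unfold snail_to_connectivity_alt
  have h2 : (fun (acc : List (Int × Int)) (q : Int × Int × Int) =>
      (PySem.List.sorted
          (((PySem.Set.ofList ((snailAdj l).getD q.2.1 [])).union
              (PySem.Set.ofList ((snailAdj l).getD q.2.2 []))).discard q.1)
          (fun j => j)).foldl (fun el other => el ++ [(q.1, other)]) acc) =
      (fun acc q => acc ++
        (PySem.List.sorted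
            (((PySem.Set.ofList ((snailAdj l).getD q.2.1 [])).union
                (PySem.Set.ofList ((snailAdj l).getD q.2.2 []))).discard q.1)
            (fun j => j)).map (fun j => (q.1, j))) := by
    funext acc q
    exact PySem.List.foldl_append_singleton_eq_map (fun j => (q.1, j)) _ acc
  rw [h2, PySem.List.foldl_append_eq_flatMap]
  simp

-- per qubit, B's sorted neighbor list IS A's inner filtered index list
lemma pvPerQ (l : List (Int × Int)) (q : Int × Int × Int) :
    PySem.List.sorted
        (((PySem.Set.ofList ((snailAdj l).getD q.2.1 [])).union
            (PySem.Set.ofList ((snailAdj l).getD q.2.2 []))).discard q.1)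
        (fun j => j) =
      ((PySem.List.enumerate l).filter (pvCond q)).map (fun t => t.1) := by
  apply PySem.List.sorted_eq_of_perm_of_pairwise_lt
  · -- permutation: both nodup, same members
    rw [List.perm_ext_iff_of_nodup]
    · intro j
      simp only [List.mem_map, List.mem_filter, PySem.Set.mem_discard, PySem.Set.mem_union,
        PySem.Set.mem_ofList, pvMem_adj, pvCond]
      constructor
      · rintro ⟨t, ⟨ht, hc⟩, hj⟩
        simp only [Bool.and_eq_true, Bool.or_eq_true, decide_eq_true_eq] at hc
        obtain ⟨hne, hsh⟩ := hc
        subst hj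
        refine ⟨?_, fun h => hne h.symm⟩
        rcases hsh with ((h | h) | h) | h
        · exact Or.inl ⟨t, ht, Or.inl h.symm, rfl⟩
        · exact Or.inl ⟨t, ht, Or.inr h.symm, rfl⟩
        · exact Or.inr ⟨t, ht, Or.inl h.symm, rfl⟩
        · exact Or.inr ⟨t, ht, Or.inr h.symm, rfl⟩
      · rintro ⟨hor, hne⟩
        rcases hor with ⟨t, ht, hv, hj⟩ | ⟨t, ht, hv, hj⟩ <;>
          refine ⟨t, ⟨ht, ?_⟩, hj⟩ <;>
          · simp only [Bool.and_eq_true, Bool.or_eq_true, decide_eq_true_eq]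
            subst hj
            exact ⟨fun h => hne h.symm, by tauto⟩
    · -- target nodup: strictly increasing indices
      have hp := PySem.List.pairwise_lt_enumerate l (0 : Int)
      exact (List.Pairwise.map (S := (· < · : Int → Int → Prop)) (fun t : Int × Int × Int => t.1)
        (fun a b h => h) (hp.filter (pvCond q))).imp (fun h => ne_of_lt h)
    · exact PySem.Set.nodup_discard _ _
        (PySem.Set.nodup_union _ _ (PySem.Set.nodup_ofList _))
  · -- target strictly increasing
    have hp := PySem.List.pairwise_lt_enumerate l (0 : Int)
    exact List.Pairwise.map (S := (· < · : Int → Int → Prop)) (fun t : Int × Int × Int => t.1)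
      (fun a b h => h) (hp.filter (pvCond q))

-- ===== VERDICT (by name: the statement is the Claim_ definition above) =====
theorem snail_to_connectivity_spec : Claim_equal_snail_to_connectivity := by
  intro l _
  show snail_to_connectivity l = snail_to_connectivity_alt l
  rw [pvA_flat, pvB_flat]
  apply List.flatMap_congr
  intro q _
  rw [pvPerQ, List.map_map]
  rfl
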